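-- pv_equiv track=rewrite | github.com/1solution/PYTHON | wikifunc.py | removeBraces
-- ===== SOURCE A (Python) =====
-- def removeBraces(s):
--     ret = ''
--     skip = 0
--     i = 0
--     s += ' ' # napr. kvuli clanku Binarni cisla, kde jne posledni extrahovana veta ukoncena jen jednim '}'
--
--     for x in s:
--         if i == len(s):
--             break
--
--         elif s[i] == '{' and s[i+1] == '{':
--             skip += 1
--             i += 1
--         elif s[i] == '}' and s[i+1] == '}' and skip > 0:
--             skip -= 1
--             i += 1
--
--         elif skip == 0:
--             ret += s[i]
--             if s[i] == '.': # pridani mezery za kazdou tecku, morphodita je dost citliva a nerozpozna konec spatne formatovane vety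
--                 ret += ' '
--         i += 1
--
--     return ret
-- ===== SOURCE B (Python) =====
-- def removeBraces(s):
--     # Rollback algorithm: append every char optimistically; '{{' records the current
--     # output length on a mark stack, '}}' pops a mark and truncates output back to it;
--     # an unclosed '{{' truncates to its mark at the end.  Periods get their space in a
--     # separate replace pass.
--     t = s + ' '
--     out = []
--     marks = []
--     i = 0
--     n = len(t)
--     while i < n:
--         c = t[i]
--         if c == '{' and t[i + 1] == '{':
--             marks.append(len(out))
--             i += 2
--         elif c == '}' and t[i + 1] == '}' and marks:
--             del out[marks.pop():]
--             i += 2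
--         else:
--             out.append(c)
--             i += 1
--     if marks:
--         del out[marks[0]:]
--     return ''.join(out).replace('.', '. ')
-- ===== Notes on version B (the rewrite author's own statement) =====
-- stated objective: alternative
-- what changed: Replaces A's depth-counter scan that suppresses output inside braces with a rollback algorithm: every character is appended optimistically, '{{' pushes the current output length on a mark stack, '}}' pops a mark and truncates the output back to it (an unclosed '{{' truncates at the end), and the space after each period is added by a separate str.replace pass.
import Mathlib
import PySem

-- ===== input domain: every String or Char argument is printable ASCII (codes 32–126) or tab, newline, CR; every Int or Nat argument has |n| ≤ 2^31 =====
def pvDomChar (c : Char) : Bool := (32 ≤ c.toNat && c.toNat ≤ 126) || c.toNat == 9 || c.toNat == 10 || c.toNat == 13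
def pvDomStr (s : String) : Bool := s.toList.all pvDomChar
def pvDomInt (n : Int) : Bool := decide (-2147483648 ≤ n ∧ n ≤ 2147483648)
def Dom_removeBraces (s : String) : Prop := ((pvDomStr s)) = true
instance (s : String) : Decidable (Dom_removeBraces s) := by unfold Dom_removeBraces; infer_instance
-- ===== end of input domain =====

-- B replaces A's depth-counter scan with a rollback algorithm (append every char, '{{' pushes
-- a mark = current output length, '}}' truncates back to the popped mark, unclosed '{{'
-- truncates at the end) followed by a separate replace pass for the periods; objective:
-- alternative, same asymptotic cost.

-- ===== PORT A =====
-- A's for-loop body never uses the loop variable x; the break at i == len(s) is modelled by a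
-- step that leaves the state unchanged once i reaches the length (i never changes afterwards,
-- exactly as after Python's break).  Indexing s[i]/s[i+1] uses List.getD; every access A makes
-- is in range (shown in the proofs), so the default is never the value read.
def pvStepA (L : List Char) (st : List Char × Int × Nat) : List Char × Int × Nat :=
  let ret := st.1
  let skip := st.2.1
  let i := st.2.2
  if i = L.length then st
  else if L.getD i ' ' = '{' ∧ L.getD (i+1) ' ' = '{' then (ret, skip + 1, i + 2)
  else if L.getD i ' ' = '}' ∧ L.getD (i+1) ' ' = '}' ∧ skip > 0 then (ret, skip - 1, i + 2)
  else if skip = 0 then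
    (ret ++ (if L.getD i ' ' = '.' then [L.getD i ' ', ' '] else [L.getD i ' ']), skip, i + 1)
  else (ret, skip, i + 1)

def removeBraces (s : String) : String :=
  let L := s.toList ++ [' ']          -- s += ' '
  let st := L.foldl (fun st _ => pvStepA L st) ([], 0, 0)   -- for x in s: …
  String.ofList st.1

-- ===== PORT B =====
-- B's while loop.  The Python mark stack (append/pop at the END of the list) is modelled with
-- cons-as-push, so Python's marks[-1]/pop() is the head and marks[0] (the bottom mark used by
-- the final truncation) is the last element.  'del out[m:]' is List.take m.
def pvLoopB (L : List Char) (out : List Char) (marks : List Nat) (i : Nat) :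
    List Char × List Nat :=
  if _h : i < L.length then
    let c := L.getD i ' '
    if c = '{' ∧ L.getD (i+1) ' ' = '{' then pvLoopB L out (out.length :: marks) (i + 2)
    else if c = '}' ∧ L.getD (i+1) ' ' = '}' ∧ marks ≠ [] then
      pvLoopB L (out.take (marks.headD 0)) marks.tail (i + 2)
    else pvLoopB L (out ++ [c]) marks (i + 1)
  else (out, marks)
termination_by L.length - i
decreasing_by all_goals omega

def removeBraces_alt (s : String) : String :=
  let t := s.toList ++ [' ']
  let r := pvLoopB t [] [] 0
  let out := match r.2.getLast? with
    | none => r.1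
    | some m => r.1.take m          -- if marks: del out[marks[0]:]
  PySem.Str.replace (String.ofList out) "." ". "

-- ===== PRECONDITION & SPEC =====
def Spec_removeBraces (s : String) (out : String) : Prop := out = removeBraces_alt s
instance (s : String) (out : String) : Decidable (Spec_removeBraces s out) := by unfold Spec_removeBraces; infer_instance

-- ===== CLAIM =====
def Claim_equal_removeBraces : Prop := ∀ (s : String), Dom_removeBraces s → Spec_removeBraces s (removeBraces s)

-- ===== LEMMAS AND PROOFS =====

-- expansion a kept period undergoes
def pvExpand (cs : List Char) : List Char :=
  cs.flatMap (fun c => if c = '.' then ['.', ' '] else [c])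

-- common specification of the brace-stripping: chars kept at depth 0
def pvStrip (L : List Char) (skip : Int) (i : Nat) : List Char :=
  if _h : i < L.length then
    let c := L.getD i ' '
    if c = '{' ∧ L.getD (i+1) ' ' = '{' then pvStrip L (skip + 1) (i + 2)
    else if c = '}' ∧ L.getD (i+1) ' ' = '}' ∧ skip > 0 then pvStrip L (skip - 1) (i + 2)
    else (if skip = 0 then [c] else []) ++ pvStrip L skip (i + 1)
  else []
termination_by L.length - i
decreasing_by all_goals omega

-- the final truncation B applies after its loop
def pvPost (r : List Char × List Nat) : List Char :=
  match r.2.getLast? with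
  | none => r.1
  | some m => r.1.take m

-- B's loop + final truncation computes pvStrip: invariant proof over the fuel k
theorem pvLoopB_strip (L : List Char) : ∀ (k i : Nat) (out : List Char) (marks : List Nat),
    L.length - i ≤ k →
    marks.Pairwise (· ≥ ·) → (∀ m ∈ marks, m ≤ out.length) →
    pvPost (pvLoopB L out marks i)
      = out.take (marks.getLast?.getD out.length) ++ pvStrip L (marks.length : Int) i := by
  intro k
  induction k with
  | zero =>
    intro i out marks hk _ hle
    have h : ¬ i < L.length := by omega
    rw [pvLoopB, pvStrip]
    simp only [dif_neg h, List.append_nil, pvPost]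
    cases hlast : marks.getLast? with
    | none => simp
    | some m =>
      have hm : m ∈ marks := List.mem_of_getLast? hlast
      simp
  | succ k ih =>
    intro i out marks hk hpw hle
    by_cases h : i < L.length
    · rw [pvLoopB, pvStrip]
      simp only [dif_pos h]
      by_cases h1 : L.getD i ' ' = '{' ∧ L.getD (i+1) ' ' = '{'
      · rw [if_pos h1, if_pos h1]
        rw [ih (i+2) out (out.length :: marks) (by omega)
            (List.pairwise_cons.mpr ⟨fun m hm => hle m hm, hpw⟩)
            (by intro m hm; rcases List.mem_cons.mp hm with h' | h'
                exacts [le_of_eq h', hle m h'])]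
        have hg : (out.length :: marks).getLast?.getD out.length
            = marks.getLast?.getD out.length := by
          cases marks with
          | nil => simp
          | cons a t => simp [List.getLast?_cons_cons]
        rw [hg]
        have hc : ((out.length :: marks).length : Int) = (marks.length : Int) + 1 := by
          simp only [List.length_cons]; push_cast; ring
        rw [hc]
      · rw [if_neg h1, if_neg h1]
        have hiff : (L.getD i ' ' = '}' ∧ L.getD (i+1) ' ' = '}' ∧ marks ≠ [])
            ↔ (L.getD i ' ' = '}' ∧ L.getD (i+1) ' ' = '}' ∧ (marks.length : Int) > 0) := by
          constructor <;> rintro ⟨ha, hb, hc⟩ <;> refine ⟨ha, hb, ?_⟩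
          · cases marks with
            | nil => exact absurd rfl hc
            | cons a t => simp only [List.length_cons]; positivity
          · intro hnil
            rw [hnil] at hc
            simp at hc
        by_cases h2 : L.getD i ' ' = '}' ∧ L.getD (i+1) ' ' = '}' ∧ marks ≠ []
        · rw [if_pos h2, if_pos (hiff.mp h2)]
          obtain ⟨m, rest, rfl⟩ : ∃ m rest, marks = m :: rest := by
            cases marks with
            | nil => exact absurd rfl h2.2.2
            | cons a t => exact ⟨a, t, rfl⟩
          have hm : m ≤ out.length := hle m List.mem_cons_self
          have hrest : ∀ m' ∈ rest, m' ≤ m := (List.pairwise_cons.mp hpw).1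
          have hlen : (out.take m).length = m := by
            simp [List.length_take, Nat.min_eq_left hm]
          simp only [List.headD_cons, List.tail_cons]
          rw [ih (i+2) (out.take m) rest (by omega) (List.pairwise_cons.mp hpw).2
              (by intro m' hm'; rw [hlen]; exact hrest m' hm')]
          have hc2 : ((m :: rest).length : Int) - 1 = (rest.length : Int) := by
            simp only [List.length_cons]; push_cast; ring
          rw [hc2]
          cases rest with
          | nil => simp [hlen]
          | cons b t =>
            have hne : (b :: t) ≠ [] := by simp
            have hb : (b :: t).getLast hne ≤ m := hrest _ (List.getLast_mem hne)
            rw [List.getLast?_cons_cons, List.getLast?_eq_some_getLast (h := hne)]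
            simp only [Option.getD_some, List.take_take]
            rw [Nat.min_eq_left hb]
        · rw [if_neg h2, if_neg (fun hx => h2 (hiff.mpr hx))]
          rw [ih (i+1) (out ++ [L.getD i ' ']) marks (by omega) hpw
              (by intro m hm; have := hle m hm; simp; omega)]
          cases marks with
          | nil => simp [List.take_of_length_le]
          | cons a t =>
            have hne : (a :: t) ≠ [] := by simp
            have hla : (a :: t).getLast hne ≤ out.length := hle _ (List.getLast_mem hne)
            rw [List.getLast?_eq_some_getLast (h := hne)]
            simp only [Option.getD_some]
            rw [List.take_append_of_le_length hla]
            have hz : ¬ (((a :: t).length : Int) = 0) := by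
              simp only [List.length_cons]; push_cast; omega
            rw [if_neg hz]
            simp
    · rw [pvLoopB, pvStrip]
      simp only [dif_neg h, List.append_nil, pvPost]
      cases hlast : marks.getLast? with
      | none => simp
      | some m =>
        have hm : m ∈ marks := List.mem_of_getLast? hlast
        simp

-- replace with the single-char pattern "." is exactly pvExpand
theorem pvReplaceGo_expand : ∀ (fuel : Nat) (cs acc : List Char),
    cs.length ≤ fuel →
    PySem.Chars.replace.go ['.'] ['.', ' '] fuel cs acc = acc.reverse ++ pvExpand cs := by
  intro fuel
  induction fuel with
  | zero =>
    intro cs acc h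
    have : cs = [] := by
      cases cs with
      | nil => rfl
      | cons c t => simp at h
    subst this
    rw [PySem.Chars.replace.go]
    simp [pvExpand]
  | succ fuel ih =>
    intro cs acc h
    cases cs with
    | nil =>
      rw [PySem.Chars.replace.go]
      simp [pvExpand]
      omega
    | cons c t =>
      rw [PySem.Chars.replace.go]
      by_cases hc : c = '.'
      · subst hc
        simp only [List.isPrefixOf, Bool.and_true, beq_self_eq_true, if_pos]
        have hd : List.drop ['.'].length ('.' :: t) = t := rfl
        rw [hd, ih t _ (by simpa using h)]
        simp [pvExpand]
      · have hnp : List.isPrefixOf ['.'] (c :: t) = false := by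
          simp [List.isPrefixOf]
          exact fun h' => absurd h'.symm hc
        rw [hnp]
        simp only [Bool.false_eq_true, reduceIte]
        rw [ih t _ (by simpa using h)]
        simp [pvExpand, hc]

-- core agreement: iterating A's step m ≥ length - i times from any in-range state
theorem pvMain (L : List Char) : ∀ (m i : Nat) (skip : Int) (acc : List Char),
    i ≤ L.length → L.length ≤ i + m →
    ((pvStepA L)^[m] (acc, skip, i)).1 = acc ++ pvExpand (pvStrip L skip i) := by
  intro m
  induction m with
  | zero =>
    intro i skip acc hle hge
    have : i = L.length := by omega
    subst this
    rw [pvStrip]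
    simp [pvExpand]
  | succ m ih =>
    intro i skip acc hle hge
    rw [Function.iterate_succ_apply]
    by_cases hi : i = L.length
    · subst hi
      have hstep : pvStepA L (acc, skip, L.length) = (acc, skip, L.length) := by
        simp [pvStepA]
      rw [hstep, ih _ skip acc le_rfl (by omega)]
    · have hlt : i < L.length := by omega
      rw [pvStepA, pvStrip]
      simp only [dif_pos hlt, if_neg hi]
      split_ifs with h1 h2 h3 h4
      · -- '{{' branch: i+1 must be in range, since the default at i+1 is ' '
        have hr : i + 2 ≤ L.length := by
          by_contra hc
          have : L.getD (i+1) ' ' = ' ' := List.getD_eq_default _ _ (by omega)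
          rw [this] at h1
          simp at h1
        rw [ih _ _ acc hr (by omega)]
      · have hr : i + 2 ≤ L.length := by
          by_contra hc
          have : L.getD (i+1) ' ' = ' ' := List.getD_eq_default _ _ (by omega)
          rw [this] at h2
          simp at h2
        rw [ih _ _ acc hr (by omega)]
      · -- copy branch (skip = 0), period case
        rw [ih _ _ _ (by omega) (by omega)]
        simp_all [pvExpand, List.getD]
      · -- copy branch, non-period case
        rw [ih _ _ _ (by omega) (by omega)]
        simp_all [pvExpand, List.getD]
      · -- skipping branch (skip ≠ 0)
        rw [ih _ _ _ (by omega) (by omega)]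
        simp

-- the fold over L with a body that ignores the element is iteration length-many times
theorem pvFoldl_ignore {α β : Type} (f : α → α) : ∀ (xs : List β) (init : α),
    xs.foldl (fun st _ => f st) init = f^[xs.length] init := by
  intro xs
  induction xs with
  | nil => intro init; simp
  | cons x xs ih =>
    intro init
    simp [List.foldl_cons, ih, Function.iterate_succ_apply]

-- ===== VERDICT =====
theorem removeBraces_spec : Claim_equal_removeBraces := by
  intro s _
  unfold Spec_removeBraces removeBraces removeBraces_alt
  simp only []
  rw [pvFoldl_ignore]
  rw [pvMain (s.toList ++ [' ']) _ 0 0 [] (by simp) (by simp)]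
  simp only [List.nil_append]
  have hB : (match (pvLoopB (s.toList ++ [' ']) [] [] 0).2.getLast? with
      | none => (pvLoopB (s.toList ++ [' ']) [] [] 0).1
      | some m => (pvLoopB (s.toList ++ [' ']) [] [] 0).1.take m)
      = pvStrip (s.toList ++ [' ']) 0 0 := by
    have := pvLoopB_strip (s.toList ++ [' ']) ((s.toList ++ [' ']).length) 0 [] []
      (by omega) (by simp) (by simp)
    simpa [pvPost] using this
  rw [hB]
  have h1 : PySem.Str.replace (String.ofList (pvStrip (s.toList ++ [' ']) 0 0)) "." ". "
      = String.ofList (PySem.Chars.replace (pvStrip (s.toList ++ [' ']) 0 0) ['.'] ['.', ' ']) := by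
    simp [PySem.Str.replace]
  rw [h1, PySem.Chars.replace]
  simp only [List.isEmpty_cons, Bool.false_eq_true, reduceIte]
  rw [pvReplaceGo_expand _ _ [] le_rfl]
  simp
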